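-- pv_equiv track=rewrite | github.com/yutao-data/Leetcode | Two Pointers/360_code_test_2.py | longest_valid_interval
-- ===== SOURCE A (Python) =====
-- def longest_valid_interval(n, heights):
--     def calc_max_length(arr):
--         max_length = 1
--         current_length = 1
--         for i in range(1, len(arr)):
--             if arr[i] - arr[i - 1] >= 1:
--                 current_length += 1
--             else:
--                 max_length = max(max_length, current_length)
--                 current_length = 1
--         return max(max_length, current_length)
--
--     max_length = calc_max_length(heights)
--
--     for i in range(n):
--         original_height = heights[i]
--
--         if i > 0:
--             heights[i] = heights[i - 1] + 1
--             max_length = max(max_length, calc_max_length(heights))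
--
--         if i < n - 1:
--             heights[i] = heights[i + 1] - 1
--             max_length = max(max_length, calc_max_length(heights))
--
--         heights[i] = original_height
--
--     return max_length
-- ===== SOURCE B (Python) =====
-- # O(n) re-implementation: prefix/suffix increasing-run lengths, each modification evaluated in O(1).
-- def longest_valid_interval(n, heights):
--     m = len(heights)
--     pre = []
--     run = 0
--     prev = None
--     for x in heights:
--         run = run + 1 if prev is not None and x - prev >= 1 else 1
--         pre.append(run)
--         prev = x
--     suf = []
--     run = 0
--     prev = None
--     for x in reversed(heights):
--         run = run + 1 if prev is not None and prev - x >= 1 else 1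
--         suf.append(run)
--         prev = x
--     suf.reverse()
--     best = max(pre, default=1)
--     for i in range(n):
--         if i > 0:
--             v = heights[i - 1] + 1
--             c = pre[i - 1] + 1
--             if i + 1 < m and heights[i + 1] - v >= 1:
--                 c += suf[i + 1]
--             best = max(best, c)
--         if i < n - 1:
--             v = heights[i + 1] - 1
--             c = 1 + suf[i + 1]
--             if i > 0 and v - heights[i - 1] >= 1:
--                 c += pre[i - 1]
--             best = max(best, c)
--     return best
-- ===== Notes on version B (the rewrite author's own statement) =====
-- stated objective: faster
-- what changed: Replaces the rescan of the whole array after every trial modification (O(n^2)) by precomputed prefix/suffix increasing-run lengths so each of the n modifications is evaluated in O(1).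
import Mathlib
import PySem

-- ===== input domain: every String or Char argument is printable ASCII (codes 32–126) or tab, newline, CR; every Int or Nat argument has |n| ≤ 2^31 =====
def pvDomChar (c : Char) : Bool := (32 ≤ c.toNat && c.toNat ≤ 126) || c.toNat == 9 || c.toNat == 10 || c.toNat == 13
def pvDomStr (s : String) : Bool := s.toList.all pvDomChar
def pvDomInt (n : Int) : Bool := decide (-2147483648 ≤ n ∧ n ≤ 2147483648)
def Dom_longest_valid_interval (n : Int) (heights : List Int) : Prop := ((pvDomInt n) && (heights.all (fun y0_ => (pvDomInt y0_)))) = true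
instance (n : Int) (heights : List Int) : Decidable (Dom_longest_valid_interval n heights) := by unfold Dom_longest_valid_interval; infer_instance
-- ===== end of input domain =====

-- B replaces A's full rescan after every trial modification (O(n^2)) by precomputed
-- prefix/suffix increasing-run lengths, evaluating each modification in O(1).
-- (A temporarily mutates `heights` in place but restores it before returning; the
-- equivalence proved here is about the return value.)


-- ===== PORT A =====
-- calc_max_length: the inner helper of A.  Indices produced by range(1, len(arr)) are
-- always in range and nonnegative, so `getD` is exact here.
def calcA (arr : List Int) : Int :=
  let p := (PySem.List.pyRange 1 (arr.length : Int) 1).foldl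
    (fun (st : Int × Int) (i : Int) =>
      if arr.getD i.toNat 0 - arr.getD (i.toNat - 1) 0 ≥ 1 then (st.1, st.2 + 1)
      else (max st.1 st.2, 1))
    (1, 1)
  max p.1 p.2

-- the body of A's `for i in range(n)` loop; `heights[i] = v` followed by a rescan and
-- restoration is the rescan of `heights.set i v`.  `getD` is exact on Pre_ (0 ≤ i < n ≤ len).
def stepA (heights : List Int) (n : Int) (maxLen : Int) (i : Int) : Int :=
  let k := i.toNat
  let m1 := if i > 0 then
      max maxLen (calcA (heights.set k (heights.getD (k - 1) 0 + 1))) else maxLen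
  if i < n - 1 then
      max m1 (calcA (heights.set k (heights.getD (k + 1) 0 - 1))) else m1

def longest_valid_interval (n : Int) (heights : List Int) : Int :=
  (PySem.List.pyRange 0 n 1).foldl (stepA heights n) (calcA heights)

-- ===== PORT B =====
-- one step of B's scan building a run-length list: state = (list so far, run, prev)
def scanStep (cmp : Int → Int → Int) (st : List Int × Int × Option Int) (x : Int) :
    List Int × Int × Option Int :=
  let run : Int := match st.2.2 with
    | some p => if cmp x p ≥ 1 then st.2.1 + 1 else 1
    | none => 1
  (st.1 ++ [run], run, some x)

-- the body of B's `for i in range(n)` loop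
def stepB (n m : Int) (heights pre suf : List Int) (best : Int) (i : Int) : Int :=
  let k := i.toNat
  let b1 := if i > 0 then
      let v := heights.getD (k - 1) 0 + 1
      let c0 := pre.getD (k - 1) 0 + 1
      let c := if i + 1 < m ∧ heights.getD (k + 1) 0 - v ≥ 1 then c0 + suf.getD (k + 1) 0 else c0
      max best c
    else best
  if i < n - 1 then
      let v := heights.getD (k + 1) 0 - 1
      let c0 := 1 + suf.getD (k + 1) 0
      let c := if i > 0 ∧ v - heights.getD (k - 1) 0 ≥ 1 then c0 + pre.getD (k - 1) 0 else c0
      max b1 c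
    else b1

def longest_valid_interval_alt (n : Int) (heights : List Int) : Int :=
  let m : Int := (heights.length : Int)
  let pre := (heights.foldl (scanStep (fun x p => x - p)) (([] : List Int), 0, none)).1
  let suf := ((heights.reverse.foldl (scanStep (fun x p => p - x)) (([] : List Int), 0, none)).1).reverse
  let best := PySem.List.maxD pre (fun y => y) 1
  (PySem.List.pyRange 0 n 1).foldl (stepB n m heights pre suf) best

-- ===== PRECONDITION & SPEC =====
-- Pre_: A indexes heights[i] for every i in range(n), so it raises IndexError exactly
-- when n > len(heights); nothing else is excluded.
def Pre_longest_valid_interval (n : Int) (heights : List Int) : Prop :=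
  n ≤ (heights.length : Int)
instance (n : Int) (heights : List Int) : Decidable (Pre_longest_valid_interval n heights) := by
  unfold Pre_longest_valid_interval; infer_instance

def pvWitness_longest_valid_interval : Int × List Int := (3, [1, 5, 2])

def Spec_longest_valid_interval (n : Int) (heights : List Int) (out : Int) : Prop := out = longest_valid_interval_alt n heights
instance (n : Int) (heights : List Int) (out : Int) : Decidable (Spec_longest_valid_interval n heights out) := by unfold Spec_longest_valid_interval; infer_instance

-- ===== CLAIM (what is proved, stated in full; the proofs are below) =====
def Claim_equal_longest_valid_interval : Prop := ∀ (n : Int) (heights : List Int), Dom_longest_valid_interval n heights → Pre_longest_valid_interval n heights → Spec_longest_valid_interval n heights (longest_valid_interval n heights)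

-- ===== LEMMAS AND PROOFS =====

-- length of the increasing run of h ending at index j (1 if it starts at j)
def rL (h : List Int) : Nat → Int
  | 0 => 1
  | j + 1 => if h.getD (j + 1) 0 - h.getD j 0 ≥ 1 then rL h j + 1 else 1

-- length of the increasing run of h starting at index j
def sL (h : List Int) (j : Nat) : Int :=
  if _hlt : j + 1 < h.length ∧ h.getD (j + 1) 0 - h.getD j 0 ≥ 1 then sL h (j + 1) + 1 else 1
  termination_by h.length - j

-- the value calc_max_length computes: max over all run-end lengths (and 1)
def MX (h : List Int) : Int :=
  (List.range h.length).foldl (fun a j => max a (rL h j)) 1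

theorem rL_ge_one (h : List Int) (j : Nat) : 1 ≤ rL h j := by
  cases j with
  | zero => simp [rL]
  | succ k => unfold rL; split <;> [have := rL_ge_one h k; skip] <;> omega

theorem sL_ge_one (h : List Int) (j : Nat) : 1 ≤ sL h j := by
  unfold sL; split
  · have := sL_ge_one h (j + 1); omega
  · omega
  termination_by h.length - j

theorem foldl_max_le {l : List Nat} {f : Nat → Int} {a b : Int}
    (hf : ∀ x ∈ l, f x ≤ b) (ha : a ≤ b) :
    l.foldl (fun acc x => max acc (f x)) a ≤ b := by
  induction l generalizing a with
  | nil => simpa using ha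
  | cons x t ih =>
      simp only [List.foldl_cons]
      exact ih (fun y hy => hf y (List.mem_cons_of_mem _ hy))
        (max_le ha (hf x (List.mem_cons_self)))

theorem one_le_MX (h : List Int) : 1 ≤ MX h :=
  (PySem.List.le_foldl_max_int (List.range h.length) (rL h) 1).1

theorem le_MX (h : List Int) {j : Nat} (hj : j < h.length) : rL h j ≤ MX h :=
  (PySem.List.le_foldl_max_int (List.range h.length) (rL h) 1).2 j (List.mem_range.mpr hj)

theorem MX_le {h : List Int} {b : Int} (hb : ∀ j, j < h.length → rL h j ≤ b) (h1 : 1 ≤ b) :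
    MX h ≤ b :=
  foldl_max_le (fun j hj => hb j (List.mem_range.mp hj)) h1

theorem getD_set (h : List Int) (i j : Nat) (v : Int) :
    (h.set i v).getD j 0 = if i = j ∧ i < h.length then v else h.getD j 0 := by
  simp only [List.getD_eq_getElem?_getD, List.getElem?_set]
  by_cases hij : i = j
  · subst hij
    by_cases hlen : i < h.length <;> simp [hlen]
  · simp [hij]

theorem rL_agree {h1 h2 : List Int} {j : Nat}
    (hag : ∀ t, t ≤ j → h1.getD t 0 = h2.getD t 0) : rL h1 j = rL h2 j := by
  induction j with
  | zero => simp [rL]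
  | succ k ih =>
      have ih' := ih (fun t ht => hag t (Nat.le_succ_of_le ht))
      simp only [rL, hag (k + 1) le_rfl, hag k (Nat.le_succ k), ih']

theorem sL_cons (x : Int) (t : List Int) (j : Nat) : sL (x :: t) (j + 1) = sL t j := by
  unfold sL
  simp only [List.length_cons, List.getD_cons_succ, Nat.add_lt_add_iff_right]
  by_cases hc : j + 1 < t.length ∧ t.getD (j + 1) 0 - t.getD j 0 ≥ 1
  · rw [dif_pos hc, dif_pos hc, sL_cons x t (j + 1)]
  · rw [dif_neg hc, dif_neg hc]
  termination_by t.length - j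
  decreasing_by omega

def PA (h : List Int) (L : Nat) : Int × Int :=
  (PySem.List.pyRange 1 (L : Int) 1).foldl
    (fun (st : Int × Int) (i : Int) =>
      if h.getD i.toNat 0 - h.getD (i.toNat - 1) 0 ≥ 1 then (st.1, st.2 + 1)
      else (max st.1 st.2, 1)) (1, 1)

theorem PA_zero (h : List Int) : PA h 0 = (1, 1) := by
  unfold PA
  rw [PySem.List.pyRange_one_eq_nil (by norm_num)]
  rfl

theorem PA_one (h : List Int) : PA h 1 = (1, 1) := by
  unfold PA
  rw [show ((1 : Nat) : Int) = 1 by norm_num, PySem.List.pyRange_one_eq_nil le_rfl]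
  rfl

theorem PA_succ (h : List Int) (L : Nat) (hL : 1 ≤ L) :
    PA h (L + 1) = (if h.getD L 0 - h.getD (L - 1) 0 ≥ 1
      then ((PA h L).1, (PA h L).2 + 1)
      else (max (PA h L).1 (PA h L).2, 1)) := by
  unfold PA
  have hcast : ((L + 1 : Nat) : Int) = ((L : Nat) : Int) + 1 := by push_cast; ring
  rw [hcast, PySem.List.pyRange_one_succ_right (by exact_mod_cast hL), List.foldl_append]
  simp [Int.toNat_natCast]

theorem calcA_aux (h : List Int) (L : Nat) :
    (PA h L).2 = rL h (L - 1) ∧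
    max (PA h L).1 (PA h L).2 = (List.range L).foldl (fun a j => max a (rL h j)) 1 := by
  induction L with
  | zero => simp [PA_zero, rL]
  | succ L ih =>
      rcases Nat.eq_zero_or_pos L with hL0 | hLp
      · subst hL0
        simp [PA_one, rL, List.range_succ]
      · obtain ⟨ih2, ih1⟩ := ih
        rw [PA_succ h L hLp, List.range_succ, List.foldl_append]
        simp only [List.foldl_cons, List.foldl_nil]
        rw [← ih1]
        obtain ⟨K, rfl⟩ : ∃ K, L = K + 1 := ⟨L - 1, by omega⟩
        have hsub : K + 1 - 1 = K := by omega
        rw [hsub] at ih2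
        have hsub2 : K + 1 + 1 - 1 = K + 1 := by omega
        rw [hsub2]
        have hrL : rL h (K + 1) =
            if h.getD (K + 1) 0 - h.getD K 0 ≥ 1 then rL h K + 1 else 1 := by rw [rL]
        have h1 := rL_ge_one h K
        by_cases hc : h.getD (K + 1) 0 - h.getD (K + 1 - 1) 0 ≥ 1
        · rw [if_pos hc]
          rw [hsub] at hc
          rw [hrL, if_pos hc, ih2]
          exact ⟨rfl, by omega⟩
        · rw [if_neg hc]
          rw [hsub] at hc
          rw [hrL, if_neg hc]
          exact ⟨rfl, by rw [ih2]⟩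

-- calc_max_length computes MX
theorem calcA_eq (h : List Int) : calcA h = MX h := by
  unfold calcA MX
  exact (calcA_aux h h.length).2

-- B's prefix scan computes the run-end lengths rL
theorem pre_spec (h : List Int) :
    (h.foldl (scanStep (fun x p => x - p)) (([] : List Int), 0, none)) =
      ((List.range h.length).map (rL h),
       (if h.isEmpty then 0 else rL h (h.length - 1)),
       (if h.isEmpty then none else some (h.getD (h.length - 1) 0))) := by
  induction h using List.reverseRecOn with
  | nil => simp
  | append_singleton t x ih =>
      rw [List.foldl_append, ih]
      simp only [List.foldl_cons, List.foldl_nil]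
      have hagree : ∀ j, j < t.length → rL (t ++ [x]) j = rL t j := by
        intro j hj
        refine rL_agree (fun u hu => ?_)
        exact List.getD_append t [x] 0 u (by omega)
      have hlast : (t ++ [x]).getD t.length 0 = x := by simp
      have hmap : (List.range t.length).map (rL (t ++ [x])) =
          (List.range t.length).map (rL t) := by
        refine List.map_congr_left (fun j hj => hagree j (List.mem_range.mp hj))
      rcases List.eq_nil_or_concat' t with rfl | hcc
      · simp [scanStep, rL]
      · have hne : t ≠ [] := by rcases hcc with ⟨s0, y, rfl⟩; simp
        have htne : t.isEmpty = false := by simpa using hne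
        have htlen : 1 ≤ t.length := List.length_pos_of_ne_nil hne
        have hR : (if t.isEmpty = true then (0 : Int) else rL t (t.length - 1))
            = rL t (t.length - 1) := by simp [htne]
        have hP : (if t.isEmpty = true then (none : Option Int)
            else some (t.getD (t.length - 1) 0)) = some (t.getD (t.length - 1) 0) := by
          simp [htne]
        rw [hR, hP]
        have hrun : rL (t ++ [x]) t.length =
            if x - t.getD (t.length - 1) 0 ≥ 1 then rL t (t.length - 1) + 1 else 1 := by
          obtain ⟨K, hK⟩ : ∃ K, t.length = K + 1 := ⟨t.length - 1, by omega⟩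
          rw [hK]
          rw [show rL (t ++ [x]) (K + 1) =
            if (t ++ [x]).getD (K + 1) 0 - (t ++ [x]).getD K 0 ≥ 1
            then rL (t ++ [x]) K + 1 else 1 from by rw [rL]]
          rw [hagree K (by omega)]
          have e1 : (t ++ [x]).getD (K + 1) 0 = x := by rw [← hK]; exact hlast
          have e2 : (t ++ [x]).getD K 0 = t.getD K 0 := List.getD_append t [x] 0 K (by omega)
          rw [e1, e2]
          simp [hK]
        simp only [scanStep]
        refine Prod.ext ?_ (Prod.ext ?_ ?_)
        · show (List.range t.length).map (rL t) ++ [_] = _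
          rw [List.length_append, List.length_singleton, List.range_succ, List.map_append,
            hmap]
          simp only [List.map_cons, List.map_nil]
          congr 1
          rw [hrun]
        · show (if x - t.getD (t.length - 1) 0 ≥ 1 then rL t (t.length - 1) + 1 else 1) = _
          rw [← hrun]
          simp
        · simp

theorem suf_spec (h : List Int) :
    (h.reverse.foldl (scanStep (fun x p => p - x)) (([] : List Int), 0, none)) =
      ((List.range h.length).map (fun k => sL h (h.length - 1 - k)),
       (if h.isEmpty then 0 else sL h 0),
       (if h.isEmpty then none else some (h.getD 0 0))) := by
  induction h with
  | nil => simp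
  | cons x t ih =>
      rw [List.reverse_cons, List.foldl_append, ih]
      rcases List.eq_nil_or_concat' t with rfl | hcc
      · simp only [List.isEmpty_nil, List.length_nil, List.range_zero, List.map_nil,
          if_pos, List.foldl_cons, List.foldl_nil, scanStep]
        have : sL [x] 0 = 1 := by rw [sL]; simp
        simp [this, List.range_succ]
      · have hne : t ≠ [] := by rcases hcc with ⟨s0, y, rfl⟩; simp
        have htne : t.isEmpty = false := by simpa using hne
        have htlen : 1 ≤ t.length := List.length_pos_of_ne_nil hne
        have hR : (if t.isEmpty = true then (0 : Int) else sL t 0) = sL t 0 := by simp [htne]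
        have hP : (if t.isEmpty = true then (none : Option Int) else some (t.getD 0 0))
            = some (t.getD 0 0) := by simp [htne]
        rw [hR, hP]
        have hs0 : sL (x :: t) 0 = if t.getD 0 0 - x ≥ 1 then sL t 0 + 1 else 1 := by
          rw [sL]
          have hcond : (0 + 1 < (x :: t).length ∧ (x :: t).getD (0 + 1) 0 - (x :: t).getD 0 0 ≥ 1)
              ↔ (t.getD 0 0 - x ≥ 1) := by
            simp only [List.length_cons, List.getD_cons_succ, List.getD_cons_zero]
            constructor
            · exact fun hx => hx.2
            · exact fun hx => ⟨by omega, hx⟩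
          by_cases hcnd : t.getD 0 0 - x ≥ 1
          · rw [dif_pos (hcond.mpr hcnd), if_pos hcnd, sL_cons]
          · rw [dif_neg (fun hx => hcnd (hcond.mp hx)), if_neg hcnd]
        simp only [List.foldl_cons, List.foldl_nil, scanStep]
        refine Prod.ext ?_ (Prod.ext ?_ ?_)
        · show (List.range t.length).map (fun k => sL t (t.length - 1 - k)) ++ [_] = _
          rw [show (x :: t).length = t.length + 1 from rfl, List.range_succ, List.map_append]
          congr 1
          · refine List.map_congr_left (fun k hk => ?_)
            have hkl : k < t.length := List.mem_range.mp hk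
            have he : t.length + 1 - 1 - k = (t.length - 1 - k) + 1 := by omega
            rw [he, sL_cons]
          · simp only [List.map_cons, List.map_nil]
            have he : t.length + 1 - 1 - t.length = 0 := by omega
            rw [he, hs0]
        · show (if t.getD 0 0 - x ≥ 1 then sL t 0 + 1 else 1) = _
          rw [← hs0]
          simp
        · simp

theorem pre_getD (h : List Int) {j : Nat} (hj : j < h.length) :
    ((h.foldl (scanStep (fun x p => x - p)) (([] : List Int), 0, none)).1).getD j 0 = rL h j := by
  rw [pre_spec]
  rw [List.getD_eq_getElem _ _ (by simpa using hj)]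
  rw [List.getElem_map]
  congr 1
  exact List.getElem_range _

theorem suf_getD (h : List Int) {j : Nat} (hj : j < h.length) :
    (((h.reverse.foldl (scanStep (fun x p => p - x)) (([] : List Int), 0, none)).1).reverse).getD j 0
      = sL h j := by
  rw [suf_spec]
  rw [List.getD_eq_getElem _ _ (by simpa using hj)]
  rw [List.getElem_reverse, List.getElem_map]
  simp only [List.length_map, List.length_range, List.getElem_range]
  congr 1
  omega

theorem maxD_eq (h : List Int) :
    PySem.List.maxD ((h.foldl (scanStep (fun x p => x - p)) (([] : List Int), 0, none)).1)
      (fun y => y) 1 = MX h := by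
  rw [pre_spec]
  by_cases h0 : h.length = 0
  · simp [PySem.List.maxD, PySem.List.max?, MX, h0]
  · rcases heq : PySem.List.max? ((List.range h.length).map (rL h)) (fun y => y) with _ | m
    · rw [PySem.List.max?_eq_none_iff] at heq
      simp [h0] at heq
    · have hmd : PySem.List.maxD ((List.range h.length).map (rL h)) (fun y => y) 1 = m := by
        unfold PySem.List.maxD
        rw [heq]
        rfl
      rw [hmd]
      obtain ⟨j, hjm, hj⟩ := List.mem_map.mp (PySem.List.max?_mem heq)
      have hjl : j < h.length := List.mem_range.mp hjm
      have hmax := PySem.List.max?_isMax heq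
      refine le_antisymm ?_ ?_
      · rw [← hj]
        exact le_MX h hjl
      · refine MX_le (fun u hu => ?_) ?_
        · exact hmax (rL h u) (List.mem_map.mpr ⟨u, List.mem_range.mpr hu, rfl⟩)
        · rw [← hj]
          exact le_trans (rL_ge_one h j) (le_refl _)

-- the O(1) candidate value B uses for the modification heights[i] := v
def cand (h : List Int) (i : Nat) (v : Int) : Int :=
  (1 + (if 0 < i ∧ v - h.getD (i - 1) 0 ≥ 1 then rL h (i - 1) else 0))
  + (if i + 1 < h.length ∧ h.getD (i + 1) 0 - v ≥ 1 then sL h (i + 1) else 0)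

theorem sL_run (h : List Int) (k : Nat) : ∀ j : Nat, j < h.length → (k : Int) < sL h j →
    j + k < h.length ∧ (k ≠ 0 → h.getD (j + k) 0 - h.getD (j + k - 1) 0 ≥ 1) := by
  induction k with
  | zero => intro j hj _; simpa using hj
  | succ k ih =>
      intro j hj hsl
      by_cases hc : j + 1 < h.length ∧ h.getD (j + 1) 0 - h.getD j 0 ≥ 1
      · have heq : sL h j = sL h (j + 1) + 1 := by rw [sL]; rw [dif_pos hc]
        have hsl' : (k : Int) < sL h (j + 1) := by rw [heq] at hsl; push_cast at hsl ⊢; omega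
        have := ih (j + 1) hc.1 hsl'
        refine ⟨by omega, fun _ => ?_⟩
        rcases Nat.eq_zero_or_pos k with hk0 | hkp
        · subst hk0; simpa using hc.2
        · have := this.2 (by omega)
          have he1 : j + 1 + k = j + (k + 1) := by omega
          rwa [he1] at this
      · have heq : sL h j = 1 := by rw [sL]; rw [dif_neg hc]
        rw [heq] at hsl; push_cast at hsl; omega

theorem sL_of_chain (h : List Int) (k : Nat) : ∀ j : Nat, j + k < h.length →
    (∀ t, 1 ≤ t → t ≤ k → h.getD (j + t) 0 - h.getD (j + t - 1) 0 ≥ 1) →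
    (k : Int) < sL h j := by
  induction k with
  | zero => intro j _ _; have := sL_ge_one h j; push_cast; omega
  | succ k ih =>
      intro j hjk hch
      have hd1 : h.getD (j + 1) 0 - h.getD j 0 ≥ 1 := by
        have := hch 1 le_rfl (by omega); simpa using this
      have hc : j + 1 < h.length ∧ h.getD (j + 1) 0 - h.getD j 0 ≥ 1 := ⟨by omega, hd1⟩
      have heq : sL h j = sL h (j + 1) + 1 := by rw [sL]; rw [dif_pos hc]
      have hih : (k : Int) < sL h (j + 1) := by
        refine ih (j + 1) (by omega) (fun t ht1 htk => ?_)
        have := hch (t + 1) (by omega) (by omega)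
        have he1 : j + (t + 1) = j + 1 + t := by omega
        rwa [he1] at this
      rw [heq]; push_cast; omega

theorem rL_set_lt {h : List Int} {i j : Nat} (v : Int) (hj : j < i) :
    rL (h.set i v) j = rL h j := by
  refine rL_agree (fun t ht => ?_)
  rw [getD_set]
  have : ¬(i = t ∧ i < h.length) := by omega
  simp [this]

theorem rL_set_self {h : List Int} {i : Nat} (v : Int) (hi : i < h.length) :
    rL (h.set i v) i = 1 + (if 0 < i ∧ v - h.getD (i - 1) 0 ≥ 1 then rL h (i - 1) else 0) := by
  cases i with
  | zero => simp [rL]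
  | succ k =>
      have h1 : (h.set (k + 1) v).getD (k + 1) 0 = v := by
        rw [getD_set]; simp [hi]
      have h2 : (h.set (k + 1) v).getD k 0 = h.getD k 0 := by
        rw [getD_set]; simp
      have h3 : rL (h.set (k + 1) v) k = rL h k := rL_set_lt v (Nat.lt_succ_self k)
      simp only [rL, h1, h2, h3, Nat.add_sub_cancel]
      have hk : (0 : Nat) < k + 1 := Nat.succ_pos k
      by_cases hc : v - h.getD k 0 ≥ 1
      · rw [if_pos hc, if_pos ⟨hk, hc⟩]; omega
      · rw [if_neg hc, if_neg (fun hx => hc hx.2)]; omega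

theorem getD_set_ne {h : List Int} {i j : Nat} (v : Int) (hij : i ≠ j) :
    (h.set i v).getD j 0 = h.getD j 0 := by
  rw [getD_set]; simp [hij]

theorem getD_set_self {h : List Int} {i : Nat} (v : Int) (hi : i < h.length) :
    (h.set i v).getD i 0 = v := by
  rw [getD_set]; simp [hi]

theorem rL_set_succ {h : List Int} {i k : Nat} {v : Int} (hi : i < h.length)
    (hd : (if k = 0 then h.getD (i + 1) 0 - v else h.getD (i + k + 1) 0 - h.getD (i + k) 0) ≥ 1) :
    rL (h.set i v) (i + (k + 1)) = rL (h.set i v) (i + k) + 1 := by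
  have e1 : (h.set i v).getD (i + k + 1) 0 = h.getD (i + k + 1) 0 := getD_set_ne v (by omega)
  show rL (h.set i v) ((i + k) + 1) = rL (h.set i v) (i + k) + 1
  rw [rL, e1]
  rcases Nat.eq_zero_or_pos k with hk | hk
  · subst hk
    have e2 : (h.set i v).getD (i + 0) 0 = v := by simpa using getD_set_self v hi
    rw [e2, if_pos (by simpa using hd)]
  · have e2 : (h.set i v).getD (i + k) 0 = h.getD (i + k) 0 := getD_set_ne v (by omega)
    rw [if_neg (by omega)] at hd
    rw [e2, if_pos hd]

theorem cand_le {h : List Int} {i : Nat} (v : Int) (hi : i < h.length) :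
    cand h i v ≤ MX (h.set i v) := by
  have hlen : (h.set i v).length = h.length := List.length_set
  have hfirst := rL_set_self v hi
  by_cases hext : i + 1 < h.length ∧ h.getD (i + 1) 0 - v ≥ 1
  · set t : Nat := (sL h (i + 1)).toNat with ht
    have hs1 : 1 ≤ sL h (i + 1) := sL_ge_one h (i + 1)
    have htc : (t : Int) = sL h (i + 1) := by omega
    have hrun : ∀ k : Nat, k ≤ t → rL (h.set i v) (i + k) = rL (h.set i v) i + k := by
      intro k
      induction k with
      | zero => intro _; simp
      | succ k ih =>
          intro hk
          have step : rL (h.set i v) (i + (k + 1)) = rL (h.set i v) (i + k) + 1 := by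
            refine rL_set_succ hi ?_
            rcases Nat.eq_zero_or_pos k with hk0 | hkp
            · subst hk0; rw [if_pos rfl]; exact hext.2
            · have hklt : (k : Int) < sL h (i + 1) := by omega
              have := (sL_run h k (i + 1) hext.1 hklt).2 (by omega)
              have he : i + 1 + k - 1 = i + k := by omega
              rw [he] at this
              have he2 : i + 1 + k = i + k + 1 := by omega
              rw [he2] at this
              rw [if_neg (show ¬ k = 0 by omega)]
              exact this
          rw [step, ih (by omega)]; push_cast; ring
    have hend : i + t < h.length := by
      have : ((t - 1 : Nat) : Int) < sL h (i + 1) := by omega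
      have := (sL_run h (t - 1) (i + 1) hext.1 this).1
      omega
    have : cand h i v = rL (h.set i v) (i + t) := by
      rw [hrun t le_rfl, hfirst]
      unfold cand
      rw [if_pos hext, htc]
    rw [this]
    exact le_MX (h.set i v) (by omega)
  · have : cand h i v = rL (h.set i v) i := by
      rw [hfirst]; unfold cand; rw [if_neg hext]; ring
    rw [this]
    exact le_MX (h.set i v) (by omega)

theorem rL_set_gt {h : List Int} {i : Nat} (v : Int) (hi : i < h.length) :
    ∀ d : Nat, 1 ≤ d → i + d < h.length →
      rL (h.set i v) (i + d) ≤ rL h (i + d) ∨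
      ((i + 1 < h.length ∧ h.getD (i + 1) 0 - v ≥ 1) ∧
        rL (h.set i v) (i + d) ≤ rL (h.set i v) i + d ∧
        ∀ t, 2 ≤ t → t ≤ d → h.getD (i + t) 0 - h.getD (i + t - 1) 0 ≥ 1) := by
  intro d
  induction d with
  | zero => omega
  | succ d ih =>
      intro _ hdl
      rcases Nat.eq_zero_or_pos d with hd0 | hdp
      · subst hd0
        by_cases hc : h.getD (i + 1) 0 - v ≥ 1
        · right
          refine ⟨⟨by omega, hc⟩, ?_, by omega⟩
          rw [rL_set_succ hi (by simpa using hc)]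
          simp only [Nat.add_zero]; push_cast; omega
        · left
          have : rL (h.set i v) (i + 1) = 1 := by
            show rL (h.set i v) (i + 0 + 1) = 1
            rw [rL]
            have e1 : (h.set i v).getD (i + 0 + 1) 0 = h.getD (i + 1) 0 :=
              getD_set_ne v (by omega)
            rw [e1, getD_set_self v hi, if_neg (by omega)]
          rw [this]; exact rL_ge_one h (i + 1)
      · by_cases hc : h.getD (i + d + 1) 0 - h.getD (i + d) 0 ≥ 1
        · have stepv : rL (h.set i v) (i + (d + 1)) = rL (h.set i v) (i + d) + 1 :=
            rL_set_succ hi (by rw [if_neg (show ¬ d = 0 by omega)]; exact hc)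
          have steph : rL h (i + (d + 1)) = rL h (i + d) + 1 := by
            show rL h ((i + d) + 1) = rL h (i + d) + 1
            rw [rL, if_pos (by omega)]
          rcases ih (by omega) (by omega) with hl | ⟨hext, hb, hch⟩
          · left; rw [stepv, steph]; omega
          · right
            refine ⟨hext, by rw [stepv]; push_cast; omega, fun t ht2 htd => ?_⟩
            rcases Nat.lt_or_ge t (d + 1) with htlt | htge
            · exact hch t ht2 (by omega)
            · have : t = d + 1 := by omega
              subst this
              have he : i + (d + 1) - 1 = i + d := by omega
              rw [he]
              have he2 : i + (d + 1) = i + d + 1 := by omega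
              rw [he2]; exact hc
        · left
          have : rL (h.set i v) (i + (d + 1)) = 1 := by
            show rL (h.set i v) ((i + d) + 1) = 1
            rw [rL, if_neg ?hcc]
            case hcc =>
              have e1 : (h.set i v).getD (i + d + 1) 0 = h.getD (i + d + 1) 0 :=
                getD_set_ne v (by omega)
              have e2 : (h.set i v).getD (i + d) 0 = h.getD (i + d) 0 :=
                getD_set_ne v (by omega)
              rw [e1, e2]; omega
          rw [this]; exact rL_ge_one h _
theorem MX_set_le {h : List Int} {i : Nat} (v : Int) (hi : i < h.length) :
    MX (h.set i v) ≤ max (MX h) (cand h i v) := by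
  have hcand1 : rL (h.set i v) i ≤ cand h i v := by
    rw [rL_set_self v hi]
    unfold cand
    have := sL_ge_one h (i + 1)
    split <;> omega
  refine MX_le (fun j hj => ?_) (le_max_of_le_left (one_le_MX h))
  rw [List.length_set] at hj
  rcases Nat.lt_trichotomy j i with hji | hji
  · rw [rL_set_lt v hji]
    exact le_max_of_le_left (le_MX h hj)
  · rcases hji with hji | hji
    · subst hji
      exact le_max_of_le_right hcand1
    · obtain ⟨d, rfl⟩ : ∃ d : Nat, j = i + d := ⟨j - i, by omega⟩
      rcases rL_set_gt v hi d (by omega) hj with hl | ⟨hext, hb, hch⟩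
      · exact le_max_of_le_left (le_trans hl (le_MX h hj))
      · refine le_max_of_le_right ?_
        have hdsl : (d : Int) ≤ sL h (i + 1) := by
          have : ((d - 1 : Nat) : Int) < sL h (i + 1) := by
            refine sL_of_chain h (d - 1) (i + 1) (by omega) (fun t ht1 htd => ?_)
            have := hch (t + 1) (by omega) (by omega)
            have he : i + (t + 1) = i + 1 + t := by omega
            rwa [he] at this
          push_cast at this ⊢; omega
        have : cand h i v = rL (h.set i v) i + sL h (i + 1) := by
          rw [rL_set_self v hi]; unfold cand; rw [if_pos hext]
        rw [this]
        omega

theorem core {h : List Int} {i : Nat} (v : Int) (hi : i < h.length) {acc : Int}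
    (hacc : MX h ≤ acc) :
    max acc (MX (h.set i v)) = max acc (cand h i v) := by
  have h1 := cand_le v hi
  have h2 := MX_set_le v hi
  omega

theorem step_eq {h pre suf : List Int} {n i acc : Int}
    (hpre : ∀ j, j < h.length → pre.getD j 0 = rL h j)
    (hsuf : ∀ j, j < h.length → suf.getD j 0 = sL h j)
    (hn : n ≤ (h.length : Int)) (hi0 : 0 ≤ i) (hin : i < n) (hacc : MX h ≤ acc) :
    stepA h n acc i = stepB n (h.length : Int) h pre suf acc i ∧ MX h ≤ stepA h n acc i := by
  have hik : ((i.toNat : Nat) : Int) = i := Int.toNat_of_nonneg hi0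
  have hkl : i.toNat < h.length := by omega
  have hA : stepA h n acc i =
      (if i < n - 1
       then max (if i > 0 then max acc (cand h i.toNat (h.getD (i.toNat - 1) 0 + 1)) else acc)
                (cand h i.toNat (h.getD (i.toNat + 1) 0 - 1))
       else (if i > 0 then max acc (cand h i.toNat (h.getD (i.toNat - 1) 0 + 1)) else acc)) := by
    unfold stepA
    dsimp only
    rw [calcA_eq, calcA_eq]
    by_cases h1 : i > 0
    · rw [if_pos h1, if_pos h1, core (h.getD (i.toNat - 1) 0 + 1) hkl hacc]
      by_cases h2 : i < n - 1
      · rw [if_pos h2, if_pos h2,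
          core (h.getD (i.toNat + 1) 0 - 1) hkl (le_trans hacc (le_max_left _ _))]
      · rw [if_neg h2, if_neg h2]
    · rw [if_neg h1, if_neg h1]
      by_cases h2 : i < n - 1
      · rw [if_pos h2, if_pos h2, core (h.getD (i.toNat + 1) 0 - 1) hkl hacc]
      · rw [if_neg h2, if_neg h2]
  have hc1 : i > 0 →
      (if i + 1 < (h.length : Int) ∧ h.getD (i.toNat + 1) 0 - (h.getD (i.toNat - 1) 0 + 1) ≥ 1
       then (pre.getD (i.toNat - 1) 0 + 1) + suf.getD (i.toNat + 1) 0
       else pre.getD (i.toNat - 1) 0 + 1)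
      = cand h i.toNat (h.getD (i.toNat - 1) 0 + 1) := by
    intro h1
    have hpre' : pre.getD (i.toNat - 1) 0 = rL h (i.toNat - 1) := hpre _ (by omega)
    unfold cand
    rw [if_pos (show 0 < i.toNat ∧ (h.getD (i.toNat - 1) 0 + 1) - h.getD (i.toNat - 1) 0 ≥ 1
      from ⟨by omega, by omega⟩)]
    by_cases hext : i.toNat + 1 < h.length ∧
        h.getD (i.toNat + 1) 0 - (h.getD (i.toNat - 1) 0 + 1) ≥ 1
    · rw [if_pos hext, if_pos (show i + 1 < (h.length : Int) ∧ _ from ⟨by omega, hext.2⟩),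
        hsuf _ hext.1, hpre']
      ring
    · rw [if_neg hext, if_neg (fun hx => hext ⟨by omega, hx.2⟩), hpre']
      ring
  have hc2 : i < n - 1 →
      (if i > 0 ∧ (h.getD (i.toNat + 1) 0 - 1) - h.getD (i.toNat - 1) 0 ≥ 1
       then (1 + suf.getD (i.toNat + 1) 0) + pre.getD (i.toNat - 1) 0
       else 1 + suf.getD (i.toNat + 1) 0)
      = cand h i.toNat (h.getD (i.toNat + 1) 0 - 1) := by
    intro h2
    have hkl2 : i.toNat + 1 < h.length := by omega
    have hsuf' : suf.getD (i.toNat + 1) 0 = sL h (i.toNat + 1) := hsuf _ hkl2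
    unfold cand
    rw [if_pos (show i.toNat + 1 < h.length ∧
      h.getD (i.toNat + 1) 0 - (h.getD (i.toNat + 1) 0 - 1) ≥ 1 from ⟨hkl2, by omega⟩)]
    by_cases hp : 0 < i.toNat ∧ (h.getD (i.toNat + 1) 0 - 1) - h.getD (i.toNat - 1) 0 ≥ 1
    · rw [if_pos hp, if_pos (show i > 0 ∧ _ from ⟨by omega, hp.2⟩), hsuf',
        hpre _ (by omega)]
      ring
    · rw [if_neg hp, if_neg (fun hx => hp ⟨by omega, hx.2⟩), hsuf']
      ring
  have hB : stepB n (h.length : Int) h pre suf acc i =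
      (if i < n - 1
       then max (if i > 0 then max acc (cand h i.toNat (h.getD (i.toNat - 1) 0 + 1)) else acc)
                (cand h i.toNat (h.getD (i.toNat + 1) 0 - 1))
       else (if i > 0 then max acc (cand h i.toNat (h.getD (i.toNat - 1) 0 + 1)) else acc)) := by
    unfold stepB
    dsimp only
    by_cases h1 : i > 0
    · rw [if_pos h1, if_pos h1, hc1 h1]
      by_cases h2 : i < n - 1
      · rw [if_pos h2, if_pos h2, hc2 h2]
      · rw [if_neg h2, if_neg h2]
    · rw [if_neg h1, if_neg h1]
      by_cases h2 : i < n - 1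
      · rw [if_pos h2, if_pos h2, hc2 h2]
      · rw [if_neg h2, if_neg h2]
  refine ⟨hA.trans hB.symm, ?_⟩
  rw [hA]
  split_ifs <;> omega

theorem fold_eq {h pre suf : List Int} {n : Int}
    (hpre : ∀ j, j < h.length → pre.getD j 0 = rL h j)
    (hsuf : ∀ j, j < h.length → suf.getD j 0 = sL h j)
    (hn : n ≤ (h.length : Int)) :
    ∀ (l : List Int) (acc : Int), (∀ i ∈ l, 0 ≤ i ∧ i < n) → MX h ≤ acc →
      l.foldl (stepA h n) acc = l.foldl (stepB n (h.length : Int) h pre suf) acc := by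
  intro l
  induction l with
  | nil => intro acc _ _; rfl
  | cons x t ih =>
      intro acc hmem hacc
      have hx := hmem x (List.mem_cons_self)
      obtain ⟨he, hge⟩ := step_eq hpre hsuf hn hx.1 hx.2 hacc
      simp only [List.foldl_cons, he]
      rw [← he]
      exact ih _ (fun i hi => hmem i (List.mem_cons_of_mem _ hi)) hge

-- ===== VERDICT (by name: the statement is the Claim_ definition above) =====
theorem longest_valid_interval_spec : Claim_equal_longest_valid_interval := by
  intro n heights _dom hpre
  unfold Spec_longest_valid_interval longest_valid_interval longest_valid_interval_alt
  dsimp only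
  rw [calcA_eq, maxD_eq]
  exact fold_eq (fun j hj => pre_getD heights hj) (fun j hj => suf_getD heights hj) hpre
    (PySem.List.pyRange 0 n 1) (MX heights)
    (fun i hi => by
      have := PySem.List.mem_pyRange_one.mp hi; exact ⟨this.1, this.2⟩)
    le_rfl
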